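-- pv_equiv track=rewrite | github.com/harneet2512/RobbyMD | eval/medxpertqa/d11/evidence_attributor.py | _find_universal_claims
-- ===== SOURCE A (Python) =====
-- def _find_universal_claims(
--     all_supporting: dict[str, list[str]],
--     candidate_ids: list[str],
-- ) -> set[str]:
--     """Identify claim texts that appear for ALL candidates (cannot discriminate)."""
--     if len(candidate_ids) <= 1:
--         return set()
--     per_candidate_sets: list[set[str]] = [
--         {c.lower().strip() for c in all_supporting.get(cid, [])}
--         for cid in candidate_ids
--     ]
--     if not per_candidate_sets:
--         return set()
--     return set.intersection(*per_candidate_sets)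
-- ===== SOURCE B (Python) =====
-- def _find_universal_claims(
--     all_supporting: dict[str, list[str]],
--     candidate_ids: list[str],
-- ) -> set[str]:
--     """Identify claim texts that appear for ALL candidates (cannot discriminate)."""
--     n = len(candidate_ids)
--     if n <= 1:
--         return set()
--     counts: dict[str, int] = {}
--     for cid in candidate_ids:
--         # count each candidate's DISTINCT normalized claims once
--         for claim in dict.fromkeys(c.lower().strip() for c in all_supporting.get(cid, [])):
--             counts[claim] = counts.get(claim, 0) + 1
--     return {claim for claim, k in counts.items() if k == n}
-- ===== Notes on version B (the rewrite author's own statement) =====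
-- stated objective: alternative
-- what changed: Replaces building a list of per-candidate sets and intersecting them all with a single count table incremented once per candidate per distinct normalized claim, keeping claims whose count equals the number of candidates.
import Mathlib
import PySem

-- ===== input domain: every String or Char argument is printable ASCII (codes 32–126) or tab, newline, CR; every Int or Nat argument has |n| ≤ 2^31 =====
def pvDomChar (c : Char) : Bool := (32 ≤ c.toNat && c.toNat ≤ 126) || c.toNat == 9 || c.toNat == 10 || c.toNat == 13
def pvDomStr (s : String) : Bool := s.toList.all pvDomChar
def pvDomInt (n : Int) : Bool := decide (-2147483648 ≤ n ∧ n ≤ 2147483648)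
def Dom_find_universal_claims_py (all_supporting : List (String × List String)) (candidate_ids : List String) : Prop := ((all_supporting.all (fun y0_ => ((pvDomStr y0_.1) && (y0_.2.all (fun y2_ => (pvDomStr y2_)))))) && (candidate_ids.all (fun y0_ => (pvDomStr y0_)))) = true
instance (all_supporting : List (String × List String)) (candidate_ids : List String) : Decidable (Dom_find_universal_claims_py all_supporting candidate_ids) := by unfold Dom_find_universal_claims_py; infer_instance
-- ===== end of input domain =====

-- B replaces the per-candidate set list + n-way intersection of A by one count table
-- (claim -> number of candidates whose distinct normalized claims contain it), keeping
-- the claims whose count equals len(candidate_ids); return value only (a set).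

-- c.lower().strip(), shared normalization of both Pythons
def pvNorm (c : String) : String := PySem.Str.strip (PySem.Str.lower c)

-- ===== PORT A =====
def find_universal_claims_py (all_supporting : List (String × List String)) (candidate_ids : List String) : List String :=
  if candidate_ids.length ≤ 1 then []
  else
    let per_candidate_sets : List (PySem.Set String) :=
      candidate_ids.map (fun cid =>
        PySem.Set.ofList (((PySem.Dict.mk all_supporting).getD cid []).map pvNorm))
    match per_candidate_sets with
    | [] => []
    | s0 :: rest => rest.foldl PySem.Set.inter s0

-- ===== PORT B =====
def find_universal_claims_py_alt (all_supporting : List (String × List String)) (candidate_ids : List String) : List String :=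
  let n := candidate_ids.length
  if n ≤ 1 then []
  else
    let counts : PySem.Dict String Int :=
      candidate_ids.foldl (fun d cid =>
        (PySem.List.dedup (((PySem.Dict.mk all_supporting).getD cid []).map pvNorm)).foldl
          (fun d claim => d.insert claim (d.getD claim 0 + 1)) d)
        PySem.Dict.empty
    PySem.Set.ofList ((counts.items.filter (fun p => p.2 == (n : Int))).map (·.1))

-- ===== PRECONDITION & SPEC =====
def Spec_find_universal_claims_py (all_supporting : List (String × List String)) (candidate_ids : List String) (out : List String) : Prop := out = find_universal_claims_py_alt all_supporting candidate_ids
instance (all_supporting : List (String × List String)) (candidate_ids : List String) (out : List String) : Decidable (Spec_find_universal_claims_py all_supporting candidate_ids out) := by unfold Spec_find_universal_claims_py; infer_instance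

-- ===== CLAIM (what is proved, stated in full; the proofs are below) =====
def Claim_equal_find_universal_claims_py : Prop := ∀ (all_supporting : List (String × List String)) (candidate_ids : List String), Dom_find_universal_claims_py all_supporting candidate_ids → Spec_find_universal_claims_py all_supporting candidate_ids (find_universal_claims_py all_supporting candidate_ids)

-- ===== LEMMAS AND PROOFS =====

-- the per-candidate normalized claim list / distinct-claim set
def pvL (all_supporting : List (String × List String)) (cid : String) : List String :=
  ((PySem.Dict.mk all_supporting).getD cid []).map pvNorm

def pvS (all_supporting : List (String × List String)) (cid : String) : PySem.Set String :=
  PySem.Set.ofList (pvL all_supporting cid)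

-- the concatenation B effectively counts over
def pvFlat (all_supporting : List (String × List String)) (cids : List String) : List String :=
  cids.flatMap (fun cid => PySem.List.dedup (pvL all_supporting cid))

-- A's fold of intersections is one filter over the first set
theorem pv_foldl_inter (rest : List (PySem.Set String)) (s0 : PySem.Set String) :
    rest.foldl PySem.Set.inter s0 = s0.filter (fun x => rest.all (fun s => s.contains x)) := by
  induction rest generalizing s0 with
  | nil => simp
  | cons t rest ih =>
    simp only [List.foldl_cons, ih, PySem.Set.inter, List.filter_filter, List.all_cons]
    exact List.filter_congr (fun x _ => by rw [Bool.and_comm])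

-- B's count of a claim = the number of candidates whose distinct claims contain it
theorem pv_count_flat (all_supporting : List (String × List String)) (cids : List String) (k : String) :
    (pvFlat all_supporting cids).count k
      = cids.countP (fun cid => (pvS all_supporting cid).contains k) := by
  induction cids with
  | nil => simp [pvFlat]
  | cons c cs ih =>
    have hstep : (PySem.List.dedup (pvL all_supporting c)).count k
        = if (pvS all_supporting c).contains k then 1 else 0 := by
      by_cases h : k ∈ pvS all_supporting c
      · rw [if_pos ((PySem.Set.contains_iff _ _).2 h)]
        exact List.count_eq_one_of_mem
          (by rw [PySem.List.dedup_eq_ofList]; exact PySem.Set.nodup_ofList _)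
          (by rw [PySem.List.dedup_eq_ofList]; exact h)
      · rw [if_neg (fun hc => h ((PySem.Set.contains_iff _ _).1 hc))]
        exact List.count_eq_zero.2 (by rw [PySem.List.dedup_eq_ofList]; exact h)
    show (PySem.List.dedup (pvL all_supporting c) ++ pvFlat all_supporting cs).count k = _
    rw [List.count_append, hstep, List.countP_cons, ih]
    split_ifs <;> omega

-- B's nested count-table fold is Counter(pvFlat ...)
theorem pv_counts_eq_counter (all_supporting : List (String × List String)) (cids : List String) :
    cids.foldl (fun d cid =>
        (PySem.List.dedup (((PySem.Dict.mk all_supporting).getD cid []).map pvNorm)).foldl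
          (fun d claim => d.insert claim (d.getD claim 0 + 1)) d)
        PySem.Dict.empty
      = PySem.Dict.counter (pvFlat all_supporting cids) := by
  rw [PySem.Dict.counter_eq_foldl, pvFlat, List.foldl_flatMap]
  rfl

theorem find_universal_claims_py_spec : Claim_equal_find_universal_claims_py := by
  intro all cids _dom
  unfold Spec_find_universal_claims_py
  unfold find_universal_claims_py find_universal_claims_py_alt
  by_cases hlen : cids.length <= 1
  · simp [hlen]
  · simp only [hlen, if_false]
    rw [pv_counts_eq_counter]
    -- B's items filter as a filter over the distinct claims of pvFlat, with a Nat test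
    rw [PySem.Dict.items_counter, List.filter_map, List.map_map]
    have h1 : ((fun p : String × Int => p.1) ∘ fun k => (k, ((pvFlat all cids).count k : Int)))
        = id := rfl
    have h2 : ((fun p : String × Int => p.2 == (cids.length : Int)) ∘
          fun k => (k, ((pvFlat all cids).count k : Int)))
        = fun k => (((pvFlat all cids).count k : Int) == (cids.length : Int)) := rfl
    rw [h1, List.map_id, h2,
      List.filter_congr (fun k _ => show (((pvFlat all cids).count k : Int) == (cids.length : Int))
          = ((pvFlat all cids).count k == cids.length) by
        by_cases h : (pvFlat all cids).count k = cids.length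
        · rw [h]; simp
        · rw [beq_eq_false_iff_ne.mpr (by exact_mod_cast h), beq_eq_false_iff_ne.mpr h])]
    -- now compare with A
    obtain ⟨c0, cs, rfl⟩ : ∃ c0 cs, cids = c0 :: cs := by
      cases cids with
      | nil => simp at hlen
      | cons a l => exact ⟨a, l, rfl⟩
    have hmapS : (fun cid => PySem.Set.ofList (((PySem.Dict.mk all).getD cid []).map pvNorm))
        = pvS all := rfl
    simp only [List.map_cons, hmapS, List.length_cons]
    rw [pv_foldl_inter]
    -- split pvFlat at the first candidate
    have hflat : pvFlat all (c0 :: cs) = pvS all c0 ++ pvFlat all cs := by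
      show PySem.List.dedup (pvL all c0) ++ pvFlat all cs = _
      rw [PySem.List.dedup_eq_ofList]; rfl
    rw [hflat, PySem.Set.ofList_append,
      PySem.Set.ofList_eq_self_of_nodup (pvS all c0) (PySem.Set.nodup_ofList (pvL all c0)),
      PySem.Set.update_eq_append_filter, List.filter_append]
    -- the tail contributes nothing: a claim counted cs.length+1 times is in candidate 0's set
    have htail :
        List.filter (fun k => (pvS all c0 ++ pvFlat all cs).count k == cs.length + 1)
          (List.filter (fun y => !(pvS all c0).contains y) (PySem.Set.ofList (pvFlat all cs))) = [] := by
      apply List.filter_eq_nil_iff.2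
      intro k hk
      have hnot : ((pvS all c0).contains k) = false := by
        have := (List.mem_filter.1 hk).2
        cases h : (pvS all c0).contains k <;> simp_all
      have hc0 : (pvS all c0).count k = 0 :=
        List.count_eq_zero.2 (fun hm => by
          rw [(PySem.Set.contains_iff _ _).2 hm] at hnot; exact Bool.noConfusion hnot)
      have hle := List.countP_le_length (l := cs) (p := fun cid => (pvS all cid).contains k)
      simp only [beq_iff_eq, List.count_append, hc0, pv_count_flat]
      omega
    rw [htail, List.append_nil]
    have hnoop : PySem.Set.ofList
          (List.filter (fun k => (pvS all c0 ++ pvFlat all cs).count k == cs.length + 1) (pvS all c0))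
        = List.filter (fun k => (pvS all c0 ++ pvFlat all cs).count k == cs.length + 1) (pvS all c0) :=
      PySem.Set.ofList_eq_self_of_nodup _ ((PySem.Set.nodup_ofList (pvL all c0)).filter _)
    rw [hnoop]
    -- on candidate 0's own set the two filter predicates agree
    apply List.filter_congr
    intro x hx
    have hcnt0 : (pvS all c0).count x = 1 :=
      List.count_eq_one_of_mem (PySem.Set.nodup_ofList _) hx
    rw [List.all_map, List.count_append, hcnt0, pv_count_flat]
    have hle := List.countP_le_length (l := cs) (p := fun cid => (pvS all cid).contains x)
    cases hall : cs.all ((fun s => s.contains x) ∘ fun cid => pvS all cid) with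
    | true =>
      have : ∀ cid ∈ cs, ((pvS all cid).contains x) = true := fun cid hcid =>
        (List.all_eq_true.1 hall) cid hcid
      rw [List.countP_eq_length.2 this]
      simp [Nat.add_comm]
    | false =>
      obtain ⟨cid, hcid, hfx⟩ : ∃ cid ∈ cs, x ∉ pvS all cid := by simpa using hall
      have hfx' : ¬ ((pvS all cid).contains x) = true := fun hc =>
        hfx ((PySem.Set.contains_iff _ _).1 hc)
      have hlt : cs.countP (fun cid => (pvS all cid).contains x) < cs.length := by
        rcases Nat.lt_or_ge (cs.countP (fun cid => (pvS all cid).contains x)) cs.length with h | h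
        · exact h
        · exact absurd (List.countP_eq_length.1 (Nat.le_antisymm hle h) cid hcid) hfx'
      exact (beq_eq_false_iff_ne.mpr (by omega)).symm
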